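-- pv_equiv track=rewrite | github.com/babar-raza/lowcode-example-generator | src/plugin_examples/publisher/readme_renderer.py | _pick_target_framework
-- ===== SOURCE A (Python) =====
-- def _pick_target_framework(preference: list[str]) -> str:
--     """Pick the preferred target framework, favouring net8.0 if present."""
--     if not preference:
--         return "net8.0"
--     for fw in preference:
--         if fw == "net8.0":
--             return "net8.0"
--     for fw in preference:
--         if fw.startswith("net") and not fw.startswith("netstandard"):
--             return fw
--     return preference[0]
-- ===== SOURCE B (Python) =====
-- def _pick_target_framework(preference: list[str]) -> str:
--     """Pick the preferred target framework, favouring net8.0 if present.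
--
--     Single linear pass: return net8.0 on sight; remember the first
--     net-but-not-netstandard framework as a fallback candidate.
--     """
--     candidate = None
--     for fw in preference:
--         if fw == "net8.0":
--             return "net8.0"
--         if candidate is None and fw.startswith("net") and not fw.startswith("netstandard"):
--             candidate = fw
--     if candidate is not None:
--         return candidate
--     return preference[0] if preference else "net8.0"
-- ===== Notes on version B (the rewrite author's own statement) =====
-- stated objective: alternative
-- what changed: Replaces A's two sequential scans (one for net8.0, one for the first net*-non-netstandard entry) plus empty guard by a single pass that carries a candidate accumulator and resolves the fallback after the loop.
import Mathlib
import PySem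

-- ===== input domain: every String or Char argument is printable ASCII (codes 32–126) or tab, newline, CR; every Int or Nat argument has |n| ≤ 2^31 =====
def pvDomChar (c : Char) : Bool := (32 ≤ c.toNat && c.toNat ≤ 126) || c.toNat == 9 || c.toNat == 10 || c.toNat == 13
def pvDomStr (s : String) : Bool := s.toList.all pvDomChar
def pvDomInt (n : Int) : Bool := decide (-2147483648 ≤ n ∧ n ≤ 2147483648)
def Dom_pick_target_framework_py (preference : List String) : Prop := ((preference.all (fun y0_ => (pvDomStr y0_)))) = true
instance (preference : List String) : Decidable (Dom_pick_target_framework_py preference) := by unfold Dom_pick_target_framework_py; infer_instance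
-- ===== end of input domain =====

-- B fuses A's two scans into one pass carrying a candidate accumulator; same O(n) cost, alternative structure.
-- ===== PORT A =====
def pick_target_framework_py (preference : List String) : String :=
  if preference.isEmpty then "net8.0"
  else if preference.any (fun fw => fw == "net8.0") then "net8.0"
  else
    match preference.find? (fun fw => PySem.Str.startswith fw "net" && !PySem.Str.startswith fw "netstandard") with
    | some fw => fw
    | none => preference.headD ""

-- ===== PORT B =====
-- the single loop: returns some r on early return / candidate, none if neither
def pickGo : List String → Option String → Option String
  | [], cand => cand
  | fw :: rest, cand =>
    if fw == "net8.0" then some "net8.0"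
    else pickGo rest
      (if cand.isNone && PySem.Str.startswith fw "net" && !PySem.Str.startswith fw "netstandard"
       then some fw else cand)

def pick_target_framework_py_alt (preference : List String) : String :=
  match pickGo preference none with
  | some r => r
  | none => match preference with
            | [] => "net8.0"
            | h :: _ => h

-- ===== PRECONDITION & SPEC =====
def Spec_pick_target_framework_py (preference : List String) (out : String) : Prop := out = pick_target_framework_py_alt preference
instance (preference : List String) (out : String) : Decidable (Spec_pick_target_framework_py preference out) := by unfold Spec_pick_target_framework_py; infer_instance

-- ===== CLAIM (what is proved, stated in full; the proofs are below) =====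
def Claim_equal_pick_target_framework_py : Prop := ∀ (preference : List String), Dom_pick_target_framework_py preference → Spec_pick_target_framework_py preference (pick_target_framework_py preference)

-- ===== LEMMAS AND PROOFS =====
lemma pickGo_some (l : List String) (c : String) :
    pickGo l (some c) = if l.any (fun fw => fw == "net8.0") then some "net8.0" else some c := by
  induction l with
  | nil => simp [pickGo]
  | cons fw rest ih =>
    rw [List.any_cons]
    by_cases h : (fw == "net8.0") = true
    · simp only [pickGo, h, if_true, Bool.true_or, if_true]
    · have h' : (fw == "net8.0") = false := by simpa using h
      simp only [pickGo, h', Bool.false_eq_true, if_false, Option.isNone_some, Bool.false_and,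
        Bool.false_or, ih]

lemma pickGo_none (l : List String) :
    pickGo l none =
      if l.any (fun fw => fw == "net8.0") then some "net8.0"
      else l.find? (fun fw => PySem.Str.startswith fw "net" && !PySem.Str.startswith fw "netstandard") := by
  induction l with
  | nil => simp [pickGo]
  | cons fw rest ih =>
    rw [List.any_cons]
    by_cases h : (fw == "net8.0") = true
    · simp only [pickGo, h, if_true, Bool.true_or, if_true]
    · have h' : (fw == "net8.0") = false := by simpa using h
      rw [show pickGo (fw :: rest) none =
          pickGo rest (if (PySem.Str.startswith fw "net" && !PySem.Str.startswith fw "netstandard") = true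
                       then some fw else none) from by
        simp only [pickGo, h', Bool.false_eq_true, if_false, Option.isNone_none, Bool.true_and]]
      rw [h', Bool.false_or]
      by_cases hp : (PySem.Str.startswith fw "net" && !PySem.Str.startswith fw "netstandard") = true
      · rw [if_pos hp, pickGo_some, List.find?_cons_of_pos (p := fun fw => PySem.Str.startswith fw "net" && !PySem.Str.startswith fw "netstandard") (a := fw) (l := rest) hp]
      · have hp' := eq_false_of_ne_true hp
        rw [if_neg hp, ih, List.find?_cons_of_neg (p := fun fw => PySem.Str.startswith fw "net" && !PySem.Str.startswith fw "netstandard") (a := fw) (l := rest) hp]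

lemma pick_eq (preference : List String) :
    Spec_pick_target_framework_py preference (pick_target_framework_py preference) := by
  unfold Spec_pick_target_framework_py pick_target_framework_py pick_target_framework_py_alt
  cases preference with
  | nil => simp [pickGo]
  | cons h t =>
    rw [pickGo_none, List.isEmpty_cons]
    by_cases he : ((h :: t).any (fun fw => fw == "net8.0")) = true
    · simp only [he, if_true, Bool.false_eq_true, if_false]
    · have he' := eq_false_of_ne_true he
      simp only [he', Bool.false_eq_true, if_false]
      cases hf : (h :: t).find? (fun fw => PySem.Str.startswith fw "net" && !PySem.Str.startswith fw "netstandard") <;>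
        simp only [List.headD_cons]

-- ===== VERDICT (by name: the statement is the Claim_ definition above) =====
theorem pick_target_framework_py_spec : Claim_equal_pick_target_framework_py :=
  fun preference _ => pick_eq preference
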